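-- pv_equiv track=rewrite | github.com/plouiserre/katas | GameOfLife/tests/test_d.py | __find_content_from_coordonnates
-- ===== SOURCE A (Python) =====
-- def __find_content_from_coordonnates(y, x, grid_content):
--     content = ""
--     for idx_g, cells in enumerate(grid_content) :
--         if y != idx_g :
--             continue
--         else :
--             for idx_c, content_cell in enumerate(cells) :
--                 if x != idx_c :
--                     continue
--                 else :
--                     content = content_cell
--     return content
-- ===== SOURCE B (Python) =====
-- def __find_content_from_coordonnates(y, x, grid_content):
--     if 0 <= y < len(grid_content):
--         row = grid_content[y]
--         if 0 <= x < len(row):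
--             return row[x]
--     return ""
-- ===== Notes on version B (the rewrite author's own statement) =====
-- stated objective: simpler
-- what changed: Replaced the two nested enumerate-scans searching for matching indices with a direct bounds check and constant-time positional indexing, keeping the empty-string default for out-of-range coordinates.
import Mathlib
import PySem

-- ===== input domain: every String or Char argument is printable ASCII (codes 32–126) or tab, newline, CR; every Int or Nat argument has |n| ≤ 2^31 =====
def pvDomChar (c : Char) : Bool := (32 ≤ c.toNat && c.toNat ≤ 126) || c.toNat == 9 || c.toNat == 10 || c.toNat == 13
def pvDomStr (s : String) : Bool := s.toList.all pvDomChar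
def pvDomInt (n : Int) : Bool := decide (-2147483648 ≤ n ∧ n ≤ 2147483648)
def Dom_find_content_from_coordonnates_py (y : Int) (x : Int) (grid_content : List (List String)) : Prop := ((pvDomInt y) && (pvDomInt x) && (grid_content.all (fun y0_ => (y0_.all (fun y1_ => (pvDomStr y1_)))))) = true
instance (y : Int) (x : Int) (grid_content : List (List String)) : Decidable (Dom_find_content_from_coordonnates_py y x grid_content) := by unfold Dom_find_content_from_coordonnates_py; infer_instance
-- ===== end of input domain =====

-- B replaces the two nested enumerate-scans with a direct bounds-checked index lookup (simpler, constant time per access).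
-- ===== PORT A =====
def find_content_from_coordonnates_py (y : Int) (x : Int) (grid_content : List (List String)) : String :=
  (PySem.List.enumerate grid_content).foldl
    (fun content p =>
      if y ≠ p.1 then content
      else (PySem.List.enumerate p.2).foldl
        (fun c q => if x ≠ q.1 then c else q.2) content)
    ""

-- ===== PORT B =====
def find_content_from_coordonnates_py_alt (y : Int) (x : Int) (grid_content : List (List String)) : String :=
  if 0 ≤ y ∧ y < grid_content.length then
    let row := grid_content.getD y.toNat []
    if 0 ≤ x ∧ x < row.length then row.getD x.toNat "" else ""
  else ""

-- ===== PRECONDITION & SPEC =====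
def Spec_find_content_from_coordonnates_py (y : Int) (x : Int) (grid_content : List (List String)) (out : String) : Prop := out = find_content_from_coordonnates_py_alt y x grid_content
instance (y : Int) (x : Int) (grid_content : List (List String)) (out : String) : Decidable (Spec_find_content_from_coordonnates_py y x grid_content out) := by unfold Spec_find_content_from_coordonnates_py; infer_instance

-- ===== CLAIM (what is proved, stated in full; the proofs are below) =====
def Claim_equal_find_content_from_coordonnates_py : Prop := ∀ (y : Int) (x : Int) (grid_content : List (List String)), Dom_find_content_from_coordonnates_py y x grid_content → Spec_find_content_from_coordonnates_py y x grid_content (find_content_from_coordonnates_py y x grid_content)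

-- ===== LEMMAS AND PROOFS =====
lemma pv_inner (x : Int) (cells : List String) (s : Int) (acc : String) :
    (PySem.List.enumerate cells s).foldl (fun c q => if x ≠ q.1 then c else q.2) acc
      = if s ≤ x ∧ x < s + cells.length then cells.getD (x - s).toNat "" else acc := by
  induction cells generalizing s acc with
  | nil =>
    rw [PySem.List.enumerate_nil, List.foldl_nil,
      if_neg (show ¬(s ≤ x ∧ x < s + (([] : List String).length : Int)) from by
        intro hc; simp only [List.length_nil, Nat.cast_zero, add_zero] at hc; omega)]
  | cons c cs ih =>
    rw [PySem.List.enumerate_cons, List.foldl_cons, ih]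
    by_cases hx : x = s
    · subst hx
      have h1 : ¬(x + 1 ≤ x ∧ x < x + 1 + (cs.length : Int)) := by omega
      have h2 : ¬(x ≠ x) := by simp
      have h3 : x ≤ x ∧ x < x + (((c :: cs).length : Nat) : Int) := by
        refine ⟨le_refl _, ?_⟩; simp only [List.length_cons]; push_cast; omega
      rw [if_neg h1, if_neg h2, if_pos h3]
      simp
    · rw [show (if x ≠ s then acc else c) = acc from if_pos hx]
      by_cases h : s + 1 ≤ x ∧ x < s + 1 + (cs.length : Int)
      · rw [if_pos h, if_pos (by simp only [List.length_cons]; push_cast; omega)]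
        rw [show (x - s).toNat = (x - (s + 1)).toNat + 1 from by omega, List.getD_cons_succ]
      · rw [if_neg h, if_neg (by simp only [List.length_cons]; push_cast; omega)]

lemma pv_outer (y x : Int) (grid : List (List String)) (s : Int) (acc : String) :
    (PySem.List.enumerate grid s).foldl
        (fun content p =>
          if y ≠ p.1 then content
          else (PySem.List.enumerate p.2).foldl (fun c q => if x ≠ q.1 then c else q.2) content)
        acc
      = if s ≤ y ∧ y < s + grid.length then
          (PySem.List.enumerate (grid.getD (y - s).toNat []) 0).foldl
            (fun c q => if x ≠ q.1 then c else q.2) acc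
        else acc := by
  induction grid generalizing s acc with
  | nil =>
    rw [PySem.List.enumerate_nil, List.foldl_nil,
      if_neg (show ¬(s ≤ y ∧ y < s + (([] : List (List String)).length : Int)) from by
        intro hc; simp only [List.length_nil, Nat.cast_zero, add_zero] at hc; omega)]
  | cons r rs ih =>
    rw [PySem.List.enumerate_cons, List.foldl_cons, ih]
    by_cases hy : y = s
    · subst hy
      have h1 : ¬(y + 1 ≤ y ∧ y < y + 1 + (rs.length : Int)) := by omega
      have h2 : ¬(y ≠ y) := by simp
      have h3 : y ≤ y ∧ y < y + (((r :: rs).length : Nat) : Int) := by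
        refine ⟨le_refl _, ?_⟩; simp only [List.length_cons]; push_cast; omega
      rw [if_neg h1, if_neg h2, if_pos h3]
      simp
    · rw [show (if y ≠ s then acc
            else (PySem.List.enumerate r 0).foldl (fun c q => if x ≠ q.1 then c else q.2) acc)
          = acc from if_pos hy]
      by_cases h : s + 1 ≤ y ∧ y < s + 1 + (rs.length : Int)
      · rw [if_pos h, if_pos (by simp only [List.length_cons]; push_cast; omega)]
        rw [show (y - s).toNat = (y - (s + 1)).toNat + 1 from by omega, List.getD_cons_succ]
      · rw [if_neg h, if_neg (by simp only [List.length_cons]; push_cast; omega)]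

-- ===== VERDICT (by name: the statement is the Claim_ definition above) =====
theorem find_content_from_coordonnates_py_spec : Claim_equal_find_content_from_coordonnates_py := by
  intro y x grid _
  unfold Spec_find_content_from_coordonnates_py find_content_from_coordonnates_py
    find_content_from_coordonnates_py_alt
  rw [show (PySem.List.enumerate grid : List (Int × List String)) = PySem.List.enumerate grid 0 from rfl,
    pv_outer]
  by_cases hy : 0 ≤ y ∧ y < (grid.length : Int)
  · rw [if_pos (by omega), if_pos hy, show y - 0 = y from by ring, pv_inner]
    by_cases hx : 0 ≤ x ∧ x < ((grid.getD y.toNat []).length : Int)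
    · rw [if_pos (by omega), if_pos hx, show x - 0 = x from by ring]
    · rw [if_neg (by omega), if_neg hx]
  · rw [if_neg (by omega), if_neg hy]
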